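-- pv_equiv track=rewrite | github.com/materialsproject/atomate2 | src/atomate2/jdftx/io/JEiters.py | gather_line_collections
-- ===== SOURCE A (Python) =====
-- def gather_line_collections(iter_type: str, text_slice: list[str]):
--     lines_collect = []
--     line_collections = []
--     _iter_flag = f"{iter_type}: Iter:"
--     for line_text in text_slice:
--         if len(line_text.strip()):
--             lines_collect.append(line_text)
--             if _iter_flag in line_text:
--                 line_collections.append(lines_collect)
--                 lines_collect = []
--         else:
--             break
--     return line_collections, lines_collect
-- ===== SOURCE B (Python) =====
-- def gather_line_collections(iter_type: str, text_slice: list[str]):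
--     _iter_flag = f"{iter_type}: Iter:"
--     # 1) active prefix: lines before the first blank (after strip)
--     prefix = []
--     for line_text in text_slice:
--         if not line_text.strip():
--             break
--         prefix.append(line_text)
--     # 2) boundary indices: lines containing the flag
--     bounds = [i for i, line_text in enumerate(prefix) if _iter_flag in line_text]
--     # 3) slice the prefix at the boundaries
--     line_collections = []
--     start = 0
--     for b in bounds:
--         line_collections.append(prefix[start:b + 1])
--         start = b + 1
--     return line_collections, prefix[start:]
-- ===== Notes on version B (the rewrite author's own statement) =====
-- stated objective: alternative
-- what changed: Replaces A's single append/reset accumulator loop by a three-phase index-then-slice decomposition: build the non-blank prefix, collect flag-line indices, then slice the prefix at those boundaries.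
import Mathlib
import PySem

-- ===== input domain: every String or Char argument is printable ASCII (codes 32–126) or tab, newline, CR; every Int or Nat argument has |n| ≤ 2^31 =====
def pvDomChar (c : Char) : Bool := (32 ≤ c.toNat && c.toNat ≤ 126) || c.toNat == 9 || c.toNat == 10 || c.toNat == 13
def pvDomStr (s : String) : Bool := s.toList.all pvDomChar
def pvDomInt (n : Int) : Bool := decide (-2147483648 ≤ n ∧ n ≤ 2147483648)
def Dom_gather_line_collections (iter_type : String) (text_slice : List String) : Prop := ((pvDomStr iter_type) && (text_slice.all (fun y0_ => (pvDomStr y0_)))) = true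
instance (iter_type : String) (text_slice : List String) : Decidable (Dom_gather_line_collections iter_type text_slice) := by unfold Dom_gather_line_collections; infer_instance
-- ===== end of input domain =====

-- B groups the same lines by a different decomposition (prefix, then boundary indices, then slicing); same cost, no speed claim.

-- ===== PORT A =====
-- A's for-loop with break, carrying the two accumulators (line_collections, lines_collect)
def gatherGoA (flag : String) (cols : List (List String)) (cur : List String) :
    List String → List (List String) × List String
  | [] => (cols, cur)
  | l :: rest =>
    if PySem.Str.len (PySem.Str.strip l) ≠ 0 then
      if PySem.Str.isIn flag l then gatherGoA flag (cols ++ [cur ++ [l]]) [] rest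
      else gatherGoA flag cols (cur ++ [l]) rest
    else (cols, cur)

def gather_line_collections (iter_type : String) (text_slice : List String) :
    List (List String) × List String :=
  gatherGoA (iter_type ++ ": Iter:") [] [] text_slice

-- ===== PORT B =====
-- B phase 1: the prefix of lines before the first line that is blank after strip
def gatherPrefix : List String → List String
  | [] => []
  | l :: rest => if PySem.Str.len (PySem.Str.strip l) = 0 then [] else l :: gatherPrefix rest

def gather_line_collections_alt (iter_type : String) (text_slice : List String) :
    List (List String) × List String :=
  let flag := iter_type ++ ": Iter:"
  let pfx := gatherPrefix text_slice
  let bounds := ((PySem.List.enumerate pfx 0).filter (fun p => PySem.Str.isIn flag p.2)).map (·.1)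
  let res := bounds.foldl
    (fun (acc : List (List String) × Int) b =>
      (acc.1 ++ [PySem.List.slice pfx (some acc.2) (some (b + 1))], b + 1)) ([], 0)
  (res.1, PySem.List.slice pfx (some res.2) none)

-- ===== PRECONDITION & SPEC =====
def Spec_gather_line_collections (iter_type : String) (text_slice : List String) (out : List (List String) × List String) : Prop := out = gather_line_collections_alt iter_type text_slice
instance (iter_type : String) (text_slice : List String) (out : List (List String) × List String) : Decidable (Spec_gather_line_collections iter_type text_slice out) := by unfold Spec_gather_line_collections; infer_instance

-- ===== CLAIM (what is proved, stated in full; the proofs are below) =====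
def Claim_equal_gather_line_collections : Prop := ∀ (iter_type : String) (text_slice : List String), Dom_gather_line_collections iter_type text_slice → Spec_gather_line_collections iter_type text_slice (gather_line_collections iter_type text_slice)

-- ===== LEMMAS AND PROOFS =====

-- reference recursive splitter: groups ending at flag lines, plus the leftover tail
def gatherSpec (flag : String) : List String → List (List String) × List String
  | [] => ([], [])
  | l :: r =>
    let s := gatherSpec flag r
    if PySem.Str.isIn flag l then ([l] :: s.1, s.2)
    else
      match s.1 with
      | [] => ([], l :: s.2)
      | g :: gs => ((l :: g) :: gs, s.2)

-- A's loop computes gatherSpec of the prefix, modulo the carried accumulators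
lemma gatherGoA_eq (flag : String) :
    ∀ (ts : List String) (cols : List (List String)) (cur : List String),
    gatherGoA flag cols cur ts =
      (cols ++ (match (gatherSpec flag (gatherPrefix ts)).1 with
                | [] => []
                | g :: gs => (cur ++ g) :: gs),
       if (gatherSpec flag (gatherPrefix ts)).1 = [] then
         cur ++ (gatherSpec flag (gatherPrefix ts)).2
       else (gatherSpec flag (gatherPrefix ts)).2) := by
  intro ts
  induction ts with
  | nil => intro cols cur; simp [gatherGoA, gatherPrefix, gatherSpec]
  | cons l r ih =>
    intro cols cur
    by_cases hb : PySem.Chars.strip l.toList = []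
    · simp [gatherGoA, gatherPrefix, gatherSpec, hb]
    · by_cases hq : PySem.Chars.isIn flag.toList l.toList = true
      · simp [gatherGoA, gatherPrefix, gatherSpec, hb, hq, ih]
        cases (gatherSpec flag (gatherPrefix r)).1 with
        | nil => simp
        | cons g gs => simp
      · simp [gatherGoA, gatherPrefix, gatherSpec, hb, hq, ih]
        cases (gatherSpec flag (gatherPrefix r)).1 with
        | nil => simp
        | cons g gs => simp

lemma take_len_succ (cur : List String) (x : String) (r : List String) :
    (cur ++ x :: r).take (cur.length + 1) = cur ++ [x] := by
  induction cur with
  | nil => simp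
  | cons c cs ih => simp [ih]

-- B's boundary fold over a suffix p of full = c₀ ++ cur ++ p computes gatherSpec p,
-- with cur (already-consumed lines since the last boundary) joined onto the first group
lemma gatherFold_eq (flag : String) :
    ∀ (p c₀ cur : List String) (g : List (List String)) (full : List String) (k a : Int),
    full = c₀ ++ (cur ++ p) → k = (c₀.length : Int) + cur.length → a = (c₀.length : Int) →
    (let res := (((PySem.List.enumerate p k).filter (fun pr => PySem.Str.isIn flag pr.2)).map (·.1)).foldl
        (fun (acc : List (List String) × Int) b =>
          (acc.1 ++ [PySem.List.slice full (some acc.2) (some (b + 1))], b + 1)) (g, a);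
      res.1 = g ++ (match (gatherSpec flag p).1 with
                    | [] => []
                    | h :: gs => (cur ++ h) :: gs)
      ∧ PySem.List.slice full (some res.2) none =
          (if (gatherSpec flag p).1 = [] then cur ++ (gatherSpec flag p).2
           else (gatherSpec flag p).2)) := by
  intro p
  induction p with
  | nil =>
    intro c₀ cur g full k a hfull hk ha
    subst hfull hk ha
    refine ⟨by simp [gatherSpec, PySem.List.enumerate], ?_⟩
    simp [gatherSpec, PySem.List.enumerate, PySem.List.slice_from_natCast]
  | cons l r ih =>
    intro c₀ cur g full k a hfull hk ha
    by_cases hq : PySem.Chars.isIn flag.toList l.toList = true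
    · -- boundary at l: emit the group cur ++ [l], restart just after l
      have hqS : PySem.Str.isIn flag l = true := by simpa using hq
      have hslice : PySem.List.slice full (some a) (some (k + 1)) = cur ++ [l] := by
        subst hfull hk ha
        have h1 : ((c₀.length : Int) + (cur.length : Int) + 1) = ((c₀.length + cur.length + 1 : Nat) : Int) := by
          push_cast; ring
        rw [h1, PySem.List.slice_natCast]
        have h2 : (c₀ ++ (cur ++ l :: r)).drop c₀.length = cur ++ l :: r := by simp
        have h3 : c₀.length + cur.length + 1 - c₀.length = cur.length + 1 := by omega
        rw [h2, h3, take_len_succ]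
      have ih' := ih (c₀ ++ (cur ++ [l])) [] (g ++ [cur ++ [l]]) full (k + 1) (k + 1)
        (by rw [hfull]; simp)
        (by rw [hk]; simp; ring)
        (by rw [hk]; simp; ring)
      simp only [PySem.List.enumerate_cons, List.filter_cons, hqS, if_pos, List.map_cons,
        List.foldl_cons, hslice]
      refine ⟨?_, ?_⟩
      · rw [ih'.1]
        simp only [gatherSpec, hqS]
        cases hS : (gatherSpec flag r).1 with
        | nil => simp
        | cons h gs => simp
      · rw [ih'.2]
        simp only [gatherSpec, hqS]
        cases (gatherSpec flag r).1 with
        | nil => simp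
        | cons h gs => simp
    · -- no boundary: l joins the pending cur
      have hqS : PySem.Str.isIn flag l = false := by simpa using hq
      have ih' := ih c₀ (cur ++ [l]) g full (k + 1) a
        (by rw [hfull]; simp)
        (by rw [hk]; simp; ring)
        ha
      simp only [PySem.List.enumerate_cons, List.filter_cons, hqS, Bool.false_eq_true, if_false]
      refine ⟨?_, ?_⟩
      · rw [ih'.1]
        simp only [gatherSpec, hqS, Bool.false_eq_true, if_false]
        cases (gatherSpec flag r).1 with
        | nil => simp
        | cons h gs => simp
      · rw [ih'.2]
        simp only [gatherSpec, hqS, Bool.false_eq_true, if_false]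
        cases (gatherSpec flag r).1 with
        | nil => simp
        | cons h gs => simp

-- ===== VERDICT (by name: the statement is the Claim_ definition above) =====
theorem gather_line_collections_spec : Claim_equal_gather_line_collections := by
  intro iter_type ts _
  unfold Spec_gather_line_collections
  unfold gather_line_collections gather_line_collections_alt
  set flag := iter_type ++ ": Iter:" with hflag
  set p := gatherPrefix ts with hp
  have hB := gatherFold_eq flag p [] [] [] p 0 0 (by simp) (by simp) (by simp)
  simp only at hB
  rw [gatherGoA_eq flag ts [] []]
  rw [← hp]
  obtain ⟨h1, h2⟩ := hB
  refine Prod.ext ?_ ?_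
  · simp only [h1, List.nil_append]
  · simp only [h2]
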